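-- pv_equiv track=rewrite | github.com/ripley2006-ui/StrategoAI-Live-Mod-Generator | system/programs/Live_Mod/Global_Mission_Settings/config_gms/gms_actions.py | _find_section_exact
-- ===== SOURCE A (Python) =====
-- def _find_section_exact(text: str, header: str) -> tuple[int, int]:
--     """Return (start,end) byte positions of a section by exact header line.
--
--     End is right before the next line that begins with '[' or EOF. (-1,-1) if missing.
--     """
--     lines = text.splitlines(keepends=True)
--     pos = 0
--     for i, line in enumerate(lines):
--         if line.strip() == header:
--             start = pos
--             j = i + 1
--             end = pos + len(line)
--             while j < len(lines):
--                 if lines[j].lstrip().startswith("["):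
--                     break
--                 end += len(lines[j])
--                 j += 1
--             return start, end
--         pos += len(line)
--     return -1, -1
-- ===== SOURCE B (Python) =====
-- def _find_section_exact(text: str, header: str) -> tuple[int, int]:
--     """Prefix-sum offsets + two separate index searches instead of interleaved scanning."""
--     lines = text.splitlines(keepends=True)
--     offsets = [0]
--     total = 0
--     for line in lines:
--         total += len(line)
--         offsets.append(total)
--     i = -1
--     for k, ln in enumerate(lines):
--         if ln.strip() == header:
--             i = k
--             break
--     if i == -1:
--         return (-1, -1)
--     j = i + 1
--     while j < len(lines) and not lines[j].lstrip().startswith("["):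
--         j += 1
--     return (offsets[i], offsets[j])
-- ===== Notes on version B (the rewrite author's own statement) =====
-- stated objective: alternative
-- what changed: Replaces A's single interleaved scan (position accumulator threaded through the header search plus a nested end-extension while loop) with three separate passes: a prefix-sum offsets array, an index search for the header line, and an index search for the next '['-line, returning (offsets[i], offsets[j]).
import Mathlib
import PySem

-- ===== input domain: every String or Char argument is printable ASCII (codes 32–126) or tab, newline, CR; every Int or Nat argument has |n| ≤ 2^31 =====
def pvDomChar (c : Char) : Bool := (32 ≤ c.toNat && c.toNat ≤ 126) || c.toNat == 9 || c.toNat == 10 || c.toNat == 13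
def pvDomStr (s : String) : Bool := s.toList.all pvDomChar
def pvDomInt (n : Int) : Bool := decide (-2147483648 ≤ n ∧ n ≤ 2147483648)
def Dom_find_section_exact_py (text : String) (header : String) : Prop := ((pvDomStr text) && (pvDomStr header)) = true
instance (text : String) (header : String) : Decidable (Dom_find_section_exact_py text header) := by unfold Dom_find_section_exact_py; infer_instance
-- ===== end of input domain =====

-- B restructures A's interleaved scan into a prefix-sum offsets array plus two separate
-- index searches (alternative decomposition, same cost); return values agree on all inputs.

-- shared helper: hand port of str.splitlines(keepends=True); exact on the Dom charset,
-- where the only line breaks are '\n', '\r' and '\r\n'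
def splitKeep : List Char → List (List Char)
  | [] => []
  | '\r' :: '\n' :: rest => (['\r', '\n']) :: splitKeep rest
  | '\r' :: rest => (['\r']) :: splitKeep rest
  | '\n' :: rest => (['\n']) :: splitKeep rest
  | c :: rest =>
    match splitKeep rest with
    | [] => [[c]]
    | l :: ls =>
      -- c belongs to the first line unless that line was opened by a break right after c;
      -- handled by prepending c when the remainder's first line is a continuation
      (c :: l) :: ls

-- ===== PORT A =====
-- inner while loop: extend end over lines until one lstrip-starts with '['
def aInner : List (List Char) → Int → Int
  | [], e => e
  | l :: rest, e =>
    if PySem.Chars.startswith (PySem.Chars.lstrip l) ['['] then e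
    else aInner rest (e + (l.length : Int))

-- outer for loop with running byte position
def aOuter (header : List Char) : List (List Char) → Int → Int × Int
  | [], _ => (-1, -1)
  | l :: rest, pos =>
    if PySem.Chars.strip l = header then (pos, aInner rest (pos + (l.length : Int)))
    else aOuter header rest (pos + (l.length : Int))

def find_section_exact_py (text : String) (header : String) : Int × Int :=
  aOuter header.toList (splitKeep text.toList) 0

-- ===== PORT B =====
-- pass 1: running totals (offsets[1..]); offsets = 0 :: bOffs lines 0
def bOffs : List (List Char) → Int → List Int
  | [], _ => []
  | l :: rest, t => (t + (l.length : Int)) :: bOffs rest (t + (l.length : Int))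

-- pass 2: index of first line whose strip equals the header
def bFindHdr (header : List Char) : List (List Char) → Option Nat
  | [] => none
  | l :: rest =>
    if PySem.Chars.strip l = header then some 0
    else (bFindHdr header rest).map (· + 1)

-- pass 3: number of lines until (exclusive) the first '['-opening line
def bFindBrk : List (List Char) → Nat
  | [] => 0
  | l :: rest =>
    if PySem.Chars.startswith (PySem.Chars.lstrip l) ['['] then 0
    else bFindBrk rest + 1

def find_section_exact_py_alt (text : String) (header : String) : Int × Int :=
  let lines := splitKeep text.toList
  let offsets : List Int := 0 :: bOffs lines 0
  match bFindHdr header.toList lines with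
  | none => (-1, -1)
  | some i =>
    let j := i + 1 + bFindBrk (lines.drop (i + 1))
    (offsets.getD i 0, offsets.getD j 0)

-- ===== PRECONDITION & SPEC =====
def Spec_find_section_exact_py (text : String) (header : String) (out : Int × Int) : Prop := out = find_section_exact_py_alt text header
instance (text : String) (header : String) (out : Int × Int) : Decidable (Spec_find_section_exact_py text header out) := by unfold Spec_find_section_exact_py; infer_instance

-- ===== CLAIM (what is proved, stated in full; the proofs are below) =====
def Claim_equal_find_section_exact_py : Prop := ∀ (text : String) (header : String), Dom_find_section_exact_py text header → Spec_find_section_exact_py text header (find_section_exact_py text header)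

-- ===== LEMMAS AND PROOFS =====

def sumLen (ls : List (List Char)) : Int := (ls.map (fun l => (l.length : Int))).sum

lemma offs_getD : ∀ (ls : List (List Char)) (t : Int) (j : Nat), j ≤ ls.length →
    (t :: bOffs ls t).getD j 0 = t + sumLen (ls.take j) := by
  intro ls
  induction ls with
  | nil =>
    intro t j hj
    have : j = 0 := Nat.le_zero.mp hj
    subst this
    simp [sumLen]
  | cons l rest ih =>
    intro t j hj
    cases j with
    | zero => simp [sumLen]
    | succ j' =>
      simp only [List.take_succ_cons, bOffs, List.getD]
      have := ih (t + (l.length : Int)) j' (by simpa using hj)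
      simp only [List.getD] at this
      simp [this, sumLen]
      ring

lemma brk_le (ls : List (List Char)) : bFindBrk ls ≤ ls.length := by
  induction ls with
  | nil => simp [bFindBrk]
  | cons l rest ih =>
    simp only [bFindBrk, List.length_cons]
    split <;> omega

lemma hdr_lt (h : List Char) : ∀ ls i, bFindHdr h ls = some i → i < ls.length := by
  intro ls
  induction ls with
  | nil => intro i hi; simp [bFindHdr] at hi
  | cons l rest ih =>
    intro i hi
    simp only [bFindHdr] at hi
    split at hi
    · simp at hi
      subst hi
      simp
    · cases hr : bFindHdr h rest with
      | none => simp [hr] at hi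
      | some i' =>
        simp [hr] at hi
        have := ih i' hr
        simp only [List.length_cons]
        omega

lemma inner_eq : ∀ (ls : List (List Char)) (e : Int),
    aInner ls e = e + sumLen (ls.take (bFindBrk ls)) := by
  intro ls
  induction ls with
  | nil => intro e; simp [aInner, sumLen]
  | cons l rest ih =>
    intro e
    simp only [aInner, bFindBrk]
    split
    · simp [sumLen]
    · rw [ih]
      simp only [sumLen, List.take_succ_cons, List.map_cons, List.sum_cons]
      ring

lemma outer_eq (h : List Char) : ∀ (ls : List (List Char)) (pos : Int),
    aOuter h ls pos =
      match bFindHdr h ls with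
      | none => (-1, -1)
      | some i => (pos + sumLen (ls.take i),
                   pos + sumLen (ls.take (i + 1 + bFindBrk (ls.drop (i + 1))))) := by
  intro ls
  induction ls with
  | nil => intro pos; simp [aOuter, bFindHdr]
  | cons l rest ih =>
    intro pos
    simp only [aOuter, bFindHdr]
    split
    · simp only [List.drop_succ_cons, List.drop_zero, List.take_zero]
      rw [inner_eq]
      have h1 : 1 + bFindBrk rest = bFindBrk rest + 1 := by omega
      simp [sumLen, h1, List.take_succ_cons]
      ring
    · rw [ih (pos + (l.length : Int))]
      cases hr : bFindHdr h rest with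
      | none => simp
      | some i' =>
        simp only [Option.map_some]
        have h1 : i' + 1 + 1 = i' + 2 := by omega
        have h2 : i' + 1 + 1 + bFindBrk (List.drop (i' + 1) rest) = (i' + 1 + bFindBrk (List.drop (i' + 1) rest)) + 1 := by omega
        simp only [h1, h2, List.take_succ_cons, List.drop_succ_cons]
        simp [sumLen]
        constructor <;> ring

theorem main_eq (text header : String) :
    find_section_exact_py text header = find_section_exact_py_alt text header := by
  unfold find_section_exact_py find_section_exact_py_alt
  rw [outer_eq]
  cases hr : bFindHdr header.toList (splitKeep text.toList) with
  | none => simp only [hr]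
  | some i =>
    have hi := hdr_lt header.toList _ i hr
    have hb := brk_le ((splitKeep text.toList).drop (i + 1))
    simp only [List.length_drop] at hb
    simp only [hr]
    rw [offs_getD (splitKeep text.toList) 0 i (by omega),
        offs_getD (splitKeep text.toList) 0 (i + 1 + bFindBrk ((splitKeep text.toList).drop (i + 1))) (by omega)]

-- ===== VERDICT (by name: the statement is the Claim_ definition above) =====
theorem find_section_exact_py_spec : Claim_equal_find_section_exact_py := by
  intro text header _
  unfold Spec_find_section_exact_py
  exact main_eq text header
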